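-- pv_equiv track=rewrite | github.com/martimgil/FP | aula09/WordList.py | possible_next_letters
-- ===== SOURCE A (Python) =====
-- import bisect
--
-- def possible_next_letters(prefix, words):
--     start = bisect.bisect_left(words, prefix)
--     end = bisect.bisect_right(words, prefix + chr(255))
--     next_letters = set()
--     for word in words[start:end]:
--         if len(word) > len(prefix):
--             next_letters.add(word[len(prefix)])
--     return sorted(next_letters)
-- ===== SOURCE B (Python) =====
-- import bisect
--
-- def possible_next_letters(prefix, words):
--     # same bisect window as the spec, but the distinct next letters are produced by a
--     # divide-and-conquer: recursively split the window, merge-union the sorted distinct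
--     # letter lists of the halves -- no set and no sort call.
--     start = bisect.bisect_left(words, prefix)
--     end = bisect.bisect_right(words, prefix + chr(255))
--     p = len(prefix)
--     seg = words[start:end]
--
--     def merge_union(xs, ys):
--         out = []
--         i = j = 0
--         while i < len(xs) and j < len(ys):
--             if xs[i] < ys[j]:
--                 out.append(xs[i]); i += 1
--             elif ys[j] < xs[i]:
--                 out.append(ys[j]); j += 1
--             else:
--                 out.append(xs[i]); i += 1; j += 1
--         out.extend(xs[i:])
--         out.extend(ys[j:])
--         return out
--
--     def letters(lo, hi):  # sorted distinct next letters of seg[lo:hi]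
--         if hi - lo <= 1:
--             if hi - lo == 1:
--                 w = seg[lo]
--                 if len(w) > p:
--                     return [w[p]]
--             return []
--         mid = (lo + hi) // 2
--         return merge_union(letters(lo, mid), letters(mid, hi))
--
--     return letters(0, len(seg))
-- ===== Notes on version B (the rewrite author's own statement) =====
-- stated objective: alternative
-- what changed: the set-accumulation over the matching window followed by sorted() is replaced by a divide-and-conquer that recursively splits the window in halves and merge-unions the sorted distinct-letter lists of the halves, so no hash set and no sort call are used
import Mathlib
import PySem

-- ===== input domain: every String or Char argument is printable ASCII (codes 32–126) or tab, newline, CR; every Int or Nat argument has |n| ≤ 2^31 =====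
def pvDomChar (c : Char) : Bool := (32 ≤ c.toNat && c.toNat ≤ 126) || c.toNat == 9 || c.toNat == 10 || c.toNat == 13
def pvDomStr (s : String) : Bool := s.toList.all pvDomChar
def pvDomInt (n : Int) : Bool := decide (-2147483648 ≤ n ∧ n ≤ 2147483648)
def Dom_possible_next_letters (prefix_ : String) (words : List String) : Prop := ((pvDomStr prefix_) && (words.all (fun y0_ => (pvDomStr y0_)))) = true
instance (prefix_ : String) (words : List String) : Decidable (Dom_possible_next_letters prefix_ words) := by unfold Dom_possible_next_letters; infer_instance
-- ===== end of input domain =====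

-- B keeps A's bisect window but replaces the set-accumulate-then-sorted() collection of the
-- distinct next letters by a divide-and-conquer: split the window in halves, merge-union the
-- sorted distinct-letter lists of the halves (no set, no sort call).
-- Both ports work on code-point lists (String.toList), PySem's exact model of Python str ordering.

-- ===== PORT A =====
def possible_next_letters (prefix_ : String) (words : List String) : List String :=
  let ws := words.map String.toList
  let pre := prefix_.toList
  let start := PySem.List.bisectLeft ws pre
  let end_ := PySem.List.bisectRight ws (pre ++ [Char.ofNat 255])
  let next_letters : PySem.Set (List Char) :=
    (PySem.List.slice ws (some (start : Int)) (some (end_ : Int))).foldl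
      (fun s word =>
        if PySem.List.len word > PySem.List.len pre then
          match PySem.List.pyGet? word (PySem.List.len pre) with
          | some c => PySem.Set.add s [c]
          | none => s
        else s)
      PySem.Set.empty
  (PySem.List.sorted next_letters (fun x => x)).map String.ofList

-- ===== PORT B =====
-- B's inner while-loop merge_union, as the obvious structural recursion over the same state
def mergeUnion (xs ys : List Char) : List Char :=
  match xs, ys with
  | [], ys => ys
  | x :: xs', [] => x :: xs'
  | x :: xs', y :: ys' =>
    if x < y then x :: mergeUnion xs' (y :: ys')
    else if y < x then y :: mergeUnion (x :: xs') ys'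
    else x :: mergeUnion xs' ys'
termination_by xs.length + ys.length

-- B's recursive letters(lo, hi): since (lo+hi)//2 - lo = (hi-lo)//2, the index recursion on
-- seg[lo:hi] is the recursion on the sublist splitting at half its length (take/drop).
def lettersDC (p : Nat) (seg : List (List Char)) : List Char :=
  if _h : seg.length ≤ 1 then
    match seg with
    | [] => []
    | w :: _ => if _hw : p < w.length then [w[p]] else []
  else
    mergeUnion (lettersDC p (seg.take (seg.length / 2))) (lettersDC p (seg.drop (seg.length / 2)))
termination_by seg.length
decreasing_by
  · simp only [List.length_take]; omega
  · simp only [List.length_drop]; omega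

def possible_next_letters_alt (prefix_ : String) (words : List String) : List String :=
  let ws := words.map String.toList
  let pre := prefix_.toList
  let start := PySem.List.bisectLeft ws pre
  let end_ := PySem.List.bisectRight ws (pre ++ [Char.ofNat 255])
  let seg := PySem.List.slice ws (some (start : Int)) (some (end_ : Int))
  (lettersDC pre.length seg).map (fun c => String.ofList [c])

-- ===== PRECONDITION & SPEC =====
def Spec_possible_next_letters (prefix_ : String) (words : List String) (out : List String) : Prop := out = possible_next_letters_alt prefix_ words
instance (prefix_ : String) (words : List String) (out : List String) : Decidable (Spec_possible_next_letters prefix_ words out) := by unfold Spec_possible_next_letters; infer_instance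

-- ===== CLAIM (what is proved, stated in full; the proofs are below) =====
def Claim_equal_possible_next_letters : Prop := ∀ (prefix_ : String) (words : List String), Dom_possible_next_letters prefix_ words → Spec_possible_next_letters prefix_ words (possible_next_letters prefix_ words)

-- ===== LEMMAS AND PROOFS =====

theorem mergeUnion_mem (xs ys : List Char) (a : Char) :
    a ∈ mergeUnion xs ys ↔ a ∈ xs ∨ a ∈ ys := by
  fun_induction mergeUnion xs ys with
  | case1 ys => simp
  | case2 x xs' => simp
  | case3 x xs' y ys' hlt ih => simp [ih]; tauto
  | case4 x xs' y ys' hlt hgt ih => simp [ih]; tauto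
  | case5 x xs' y ys' hlt hgt ih =>
    have hxy : x = y := le_antisymm (not_lt.mp hgt) (not_lt.mp hlt)
    subst hxy; simp [ih]; tauto

theorem mergeUnion_pairwise (xs ys : List Char)
    (hx : xs.Pairwise (· < ·)) (hy : ys.Pairwise (· < ·)) :
    (mergeUnion xs ys).Pairwise (· < ·) := by
  fun_induction mergeUnion xs ys with
  | case1 ys => exact hy
  | case2 x xs' => exact hx
  | case3 x xs' y ys' hlt ih =>
    rw [List.pairwise_cons] at hx ⊢
    refine ⟨?_, ih hx.2 hy⟩
    intro z hz
    rcases (mergeUnion_mem _ _ z).mp hz with hz | hz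
    · exact hx.1 z hz
    · rcases List.mem_cons.mp hz with rfl | hz
      · exact hlt
      · exact lt_trans hlt ((List.pairwise_cons.mp hy).1 z hz)
  | case4 x xs' y ys' hlt hgt ih =>
    rw [List.pairwise_cons] at hy ⊢
    refine ⟨?_, ih hx hy.2⟩
    intro z hz
    rcases (mergeUnion_mem _ _ z).mp hz with hz | hz
    · rcases List.mem_cons.mp hz with rfl | hz
      · exact hgt
      · exact lt_trans hgt ((List.pairwise_cons.mp hx).1 z hz)
    · exact hy.1 z hz
  | case5 x xs' y ys' hlt hgt ih =>
    have hxy : x = y := le_antisymm (not_lt.mp hgt) (not_lt.mp hlt)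
    rw [List.pairwise_cons] at hx hy ⊢
    refine ⟨?_, ih hx.2 hy.2⟩
    intro z hz
    rcases (mergeUnion_mem _ _ z).mp hz with hz | hz
    · exact hx.1 z hz
    · exact hxy ▸ hy.1 z hz

theorem lettersDC_pairwise (p : Nat) (seg : List (List Char)) :
    (lettersDC p seg).Pairwise (· < ·) := by
  fun_induction lettersDC p seg with
  | case1 h1 h2 => simp
  | case2 w t h1 hw h2 => simp
  | case3 w t h1 hw h2 => simp
  | case4 seg h ihA ihB => exact mergeUnion_pairwise _ _ (by assumption) (by assumption)

theorem lettersDC_mem (p : Nat) (seg : List (List Char)) (c : Char) :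
    c ∈ lettersDC p seg ↔ ∃ w ∈ seg, ∃ _h : p < w.length, w[p] = c := by
  fun_induction lettersDC p seg with
  | case1 h1 h2 => simp
  | case2 w t h1 hw h2 =>
    have ht : t = [] := by cases t with | nil => rfl | cons a b => simp at h1
    subst ht
    simp only [List.mem_cons, List.not_mem_nil, or_false]
    constructor
    · intro hc; exact ⟨w, rfl, hw, hc.symm⟩
    · rintro ⟨w', rfl, h', hc⟩; exact hc.symm
  | case3 w t h1 hw h2 =>
    have ht : t = [] := by cases t with | nil => rfl | cons a b => simp at h1
    subst ht
    simp only [List.not_mem_nil, false_iff]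
    rintro ⟨w', hw', h', _⟩
    have hww : w' = w := by simpa using hw'
    subst hww; exact hw h' 
  | case4 seg h ihA ihB =>
    rw [mergeUnion_mem]
    rw [ihA, ihB]
    constructor
    · rintro (⟨w, hw, hc⟩ | ⟨w, hw, hc⟩)
      · exact ⟨w, List.mem_of_mem_take hw, hc⟩
      · exact ⟨w, List.mem_of_mem_drop hw, hc⟩
    · rintro ⟨w, hw, hc⟩
      rw [← List.take_append_drop (seg.length / 2) seg, List.mem_append] at hw
      rcases hw with hw | hw
      · exact Or.inl ⟨w, hw, hc⟩
      · exact Or.inr ⟨w, hw, hc⟩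

-- the body of A's collection loop, as a named step function
def stepA (pre : List Char) (s : PySem.Set (List Char)) (word : List Char) : PySem.Set (List Char) :=
  if PySem.List.len word > PySem.List.len pre then
    match PySem.List.pyGet? word (PySem.List.len pre) with
    | some c => PySem.Set.add s [c]
    | none => s
  else s

theorem stepA_eq (pre : List Char) (s : PySem.Set (List Char)) (w : List Char) :
    stepA pre s w = if h : pre.length < w.length then PySem.Set.add s [w[pre.length]] else s := by
  unfold stepA
  by_cases h : pre.length < w.length
  · rw [dif_pos h, if_pos (by simpa [PySem.List.len_eq] using h)]
    have hget : PySem.List.pyGet? w (PySem.List.len pre) = some w[pre.length] := by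
      simp [PySem.List.len_eq, PySem.List.pyGet?_natCast, List.getElem?_eq_getElem h]
    rw [hget]
  · rw [dif_neg h, if_neg (by simpa [PySem.List.len_eq] using h)]

theorem mem_foldA (pre : List Char) (seg : List (List Char)) :
    ∀ (s : PySem.Set (List Char)) (x : List Char),
    x ∈ seg.foldl (stepA pre) s ↔ x ∈ s ∨ ∃ w ∈ seg, ∃ _h : pre.length < w.length, x = [w[pre.length]] := by
  induction seg with
  | nil => intro s x; simp
  | cons w t ih =>
    intro s x
    simp only [List.foldl_cons]
    rw [ih, stepA_eq]
    by_cases h : pre.length < w.length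
    · rw [dif_pos h, PySem.Set.mem_add]
      constructor
      · rintro ((hx | hx) | ⟨w', hw', hc⟩)
        · exact Or.inl hx
        · exact Or.inr ⟨w, List.mem_cons_self, h, hx⟩
        · exact Or.inr ⟨w', List.mem_cons_of_mem _ hw', hc⟩
      · rintro (hx | ⟨w', hw', h', hc⟩)
        · exact Or.inl (Or.inl hx)
        · rcases List.mem_cons.mp hw' with rfl | hw'
          · exact Or.inl (Or.inr hc)
          · exact Or.inr ⟨w', hw', h', hc⟩
    · rw [dif_neg h]
      constructor
      · rintro (hx | ⟨w', hw', hc⟩)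
        · exact Or.inl hx
        · exact Or.inr ⟨w', List.mem_cons_of_mem _ hw', hc⟩
      · rintro (hx | ⟨w', hw', h', hc⟩)
        · exact Or.inl hx
        · rcases List.mem_cons.mp hw' with rfl | hw'
          · exact absurd h' h
          · exact Or.inr ⟨w', hw', h', hc⟩

theorem nodup_foldA (pre : List Char) (seg : List (List Char)) :
    ∀ (s : PySem.Set (List Char)), s.Nodup → (seg.foldl (stepA pre) s).Nodup := by
  induction seg with
  | nil => intro s h; simpa using h
  | cons w t ih =>
    intro s h
    simp only [List.foldl_cons]
    apply ih
    rw [stepA_eq]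
    split
    · exact PySem.Set.nodup_add _ _ h
    · exact h

-- ===== VERDICT (by name: the statement is the Claim_ definition above) =====
theorem possible_next_letters_spec : Claim_equal_possible_next_letters := by
  intro prefix_ words _hdom
  unfold Spec_possible_next_letters
  set ws := words.map String.toList with hws
  set pre := prefix_.toList with hpre
  set a := PySem.List.bisectLeft ws pre with hA
  set b := PySem.List.bisectRight ws (pre ++ [Char.ofNat 255]) with hB
  set seg := PySem.List.slice ws (some (a : Int)) (some (b : Int)) with hseg
  have hAeq : possible_next_letters prefix_ words
      = (PySem.List.sorted (seg.foldl (stepA pre) PySem.Set.empty) (fun x => x)).map String.ofList := rfl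
  have hBeq : possible_next_letters_alt prefix_ words
      = (lettersDC pre.length seg).map (fun c => String.ofList [c]) := rfl
  rw [hAeq, hBeq]
  set s := seg.foldl (stepA pre) PySem.Set.empty with hs
  set ls := lettersDC pre.length seg with hls
  set ys : List (List Char) := ls.map (fun c => [c]) with hys
  have hnd_s : s.Nodup := nodup_foldA pre seg PySem.Set.empty (by simp [PySem.Set.empty])
  have hpw_ls : ls.Pairwise (· < ·) := lettersDC_pairwise pre.length seg
  have hnd_ls : ls.Nodup := hpw_ls.imp ne_of_lt
  have hnd_ys : ys.Nodup := hnd_ls.map (fun c c' h => by simpa using h)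
  have hmem : ∀ x, x ∈ ys ↔ x ∈ s := by
    intro x
    rw [hys, List.mem_map, hs, mem_foldA]
    simp only [PySem.Set.empty, List.not_mem_nil, false_or]
    constructor
    · rintro ⟨c, hc, rfl⟩
      obtain ⟨w, hw, h', hc⟩ := (lettersDC_mem pre.length seg c).mp hc
      exact ⟨w, hw, h', by rw [hc]⟩
    · rintro ⟨w, hw, h', rfl⟩
      exact ⟨w[pre.length], (lettersDC_mem pre.length seg _).mpr ⟨w, hw, h', rfl⟩, rfl⟩
  have hpw_ys : ys.Pairwise (fun u v => u < v) := by
    rw [hys]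
    exact List.pairwise_map.mpr (hpw_ls.imp (fun h => List.Lex.rel h))
  have hperm : ys.Perm s := (List.perm_ext_iff_of_nodup hnd_ys hnd_s).mpr hmem
  have hbr : (fun (u v : List Char) => u.decidableLT v) = (LinearOrder.toDecidableLT : DecidableLT (List Char)) :=
    funext fun _ => funext fun _ => Subsingleton.elim _ _
  have hsorted : PySem.List.sorted s (fun x => x) = ys := by
    calc PySem.List.sorted s (fun x => x)
        = @PySem.List.sorted _ _ List.instLinearOrder.toLT LinearOrder.toDecidableLT s (fun x => x) false :=
          congrArg (fun i => @PySem.List.sorted (List Char) (List Char) List.instLT i s (fun x => x) false) hbr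
      _ = ys := PySem.List.sorted_eq_of_perm_of_pairwise_lt s ys (fun x => x) hperm hpw_ys
  rw [hsorted, hys, List.map_map]
  rfl
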